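-- pv_equiv track=rewrite | github.com/arek-grows/Challenges | Challenges 21-40/Challenge33.py | intersection_union
-- ===== SOURCE A (Python) =====
-- from typing import List, Tuple
--
-- def intersection_union(list_a: List[int], list_b: List[int]) -> Tuple[List[int], List[int]]:
--     intersection = []
--     union = []
--     for a in list_a:
--         if a not in union:
--             union.append(a)
--         if a in list_b and a not in intersection:
--             intersection.append(a)
--     for b in list_b:
--         if b not in union:
--             union.append(b)
--     intersection.sort()
--     union.sort()
--     return intersection, union  # Put your code here!
-- ===== SOURCE B (Python) =====
-- def _sorted_unique(xs):
--     ys = sorted(xs)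
--     out = []
--     prev = None
--     for x in ys:
--         if prev is None or prev != x:
--             out.append(x)
--         prev = x
--     return out
--
--
-- def intersection_union(list_a, list_b):
--     xs = _sorted_unique(list_a)
--     ys = _sorted_unique(list_b)
--     inter, union = [], []
--     i = j = 0
--     while i < len(xs) and j < len(ys):
--         if xs[i] == ys[j]:
--             inter.append(xs[i])
--             union.append(xs[i])
--             i += 1
--             j += 1
--         elif xs[i] < ys[j]:
--             union.append(xs[i])
--             i += 1
--         else:
--             union.append(ys[j])
--             j += 1
--     union.extend(xs[i:])
--     union.extend(ys[j:])
--     return inter, union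
-- ===== Notes on version B (the rewrite author's own statement) =====
-- stated objective: faster
-- what changed: Replaces A's nested linear membership scans with sort + adjacent-duplicate collapse on each list followed by a two-pointer merge that emits intersection and union in one sorted pass.
import Mathlib
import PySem

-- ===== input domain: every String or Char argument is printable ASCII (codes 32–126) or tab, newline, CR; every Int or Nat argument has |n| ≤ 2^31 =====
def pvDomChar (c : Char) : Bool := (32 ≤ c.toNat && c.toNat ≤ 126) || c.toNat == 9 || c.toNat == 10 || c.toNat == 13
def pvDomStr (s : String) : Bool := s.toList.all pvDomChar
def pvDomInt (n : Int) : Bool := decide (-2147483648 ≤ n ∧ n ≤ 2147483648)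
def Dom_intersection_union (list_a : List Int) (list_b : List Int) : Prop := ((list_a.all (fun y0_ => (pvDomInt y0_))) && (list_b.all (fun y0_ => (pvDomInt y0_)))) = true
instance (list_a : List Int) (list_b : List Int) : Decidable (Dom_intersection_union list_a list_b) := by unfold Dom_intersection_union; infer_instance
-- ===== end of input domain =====

-- B computes the same sorted deduped (intersection, union) by sorting and collapsing duplicates in each list, then a single two-pointer merge, instead of A's quadratic membership-append loops; measurably faster.


-- ===== PORT A =====
-- literal transliteration of A: two append-loops with membership tests, then sort both lists
def intersection_union (list_a : List Int) (list_b : List Int) : List Int × List Int :=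
  let s1 := list_a.foldl (fun (st : List Int × List Int) a =>
      let union := if a ∈ st.2 then st.2 else st.2 ++ [a]
      let inter := if a ∈ list_b ∧ a ∉ st.1 then st.1 ++ [a] else st.1
      (inter, union)) ([], [])
  let union2 := list_b.foldl (fun u b => if b ∈ u then u else u ++ [b]) s1.2
  (PySem.List.sorted s1.1 (fun x => x) false, PySem.List.sorted union2 (fun x => x) false)

-- ===== PORT B =====
-- _sorted_unique: sorted(xs), then a loop that appends x unless the previous element equals x
def sortedUnique (xs : List Int) : List Int :=
  let ys := PySem.List.sorted xs (fun x => x) false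
  (ys.foldl (fun (st : List Int × Option Int) x =>
      let out := if st.2 = none ∨ st.2 ≠ some x then st.1 ++ [x] else st.1
      (out, some x)) ([], none)).1

-- the while loop over indices i, j becomes the obvious recursion on the two list suffixes;
-- the base cases are the two trailing union.extend calls (the other suffix is empty there)
def pvMerge : List Int → List Int → List Int × List Int
  | [], ys => ([], ys)
  | x :: xs, [] => ([], x :: xs)
  | x :: xs, y :: ys =>
    if x = y then
      let r := pvMerge xs ys
      (x :: r.1, x :: r.2)
    else if x < y then
      let r := pvMerge xs (y :: ys)
      (r.1, x :: r.2)
    else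
      let r := pvMerge (x :: xs) ys
      (r.1, y :: r.2)
termination_by xs ys => xs.length + ys.length

def intersection_union_alt (list_a : List Int) (list_b : List Int) : List Int × List Int :=
  pvMerge (sortedUnique list_a) (sortedUnique list_b)

-- ===== PRECONDITION & SPEC =====
def Spec_intersection_union (list_a : List Int) (list_b : List Int) (out : List Int × List Int) : Prop := out = intersection_union_alt list_a list_b
instance (list_a : List Int) (list_b : List Int) (out : List Int × List Int) : Decidable (Spec_intersection_union list_a list_b out) := by unfold Spec_intersection_union; infer_instance

-- ===== CLAIM (what is proved, stated in full; the proofs are below) =====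
def Claim_equal_intersection_union : Prop := ∀ (list_a : List Int) (list_b : List Int), Dom_intersection_union list_a list_b → Spec_intersection_union list_a list_b (intersection_union list_a list_b)

-- ===== LEMMAS AND PROOFS =====

-- invariant of A's first loop: both components stay Nodup and their membership is the set-union
-- of the incoming state with (the prefix consumed ∩ list_b) resp. the prefix consumed
theorem pv_loopA (lb : List Int) :
    ∀ (l : List Int) (i u : List Int), i.Nodup → u.Nodup →
      ((l.foldl (fun (st : List Int × List Int) a =>
          let union := if a ∈ st.2 then st.2 else st.2 ++ [a]
          let inter := if a ∈ lb ∧ a ∉ st.1 then st.1 ++ [a] else st.1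
          (inter, union)) (i, u)).1.Nodup ∧
       (l.foldl (fun (st : List Int × List Int) a =>
          let union := if a ∈ st.2 then st.2 else st.2 ++ [a]
          let inter := if a ∈ lb ∧ a ∉ st.1 then st.1 ++ [a] else st.1
          (inter, union)) (i, u)).2.Nodup ∧
       (∀ x, x ∈ (l.foldl (fun (st : List Int × List Int) a =>
          let union := if a ∈ st.2 then st.2 else st.2 ++ [a]
          let inter := if a ∈ lb ∧ a ∉ st.1 then st.1 ++ [a] else st.1
          (inter, union)) (i, u)).1 ↔ x ∈ i ∨ (x ∈ l ∧ x ∈ lb)) ∧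
       (∀ x, x ∈ (l.foldl (fun (st : List Int × List Int) a =>
          let union := if a ∈ st.2 then st.2 else st.2 ++ [a]
          let inter := if a ∈ lb ∧ a ∉ st.1 then st.1 ++ [a] else st.1
          (inter, union)) (i, u)).2 ↔ x ∈ u ∨ x ∈ l)) := by
  intro l
  induction l with
  | nil => intro i u hi hu; simp [hi, hu]
  | cons a t ih =>
    intro i u hi hu
    simp only [List.foldl_cons]
    have hi' : (if a ∈ lb ∧ a ∉ i then i ++ [a] else i).Nodup := by
      split_ifs with h
      · exact hi.append (List.nodup_singleton a) (by simpa using h.2)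
      · exact hi
    have hu' : (if a ∈ u then u else u ++ [a]).Nodup := by
      split_ifs with h
      · exact hu
      · exact hu.append (List.nodup_singleton _) (by simpa using h)
    obtain ⟨n1, n2, m1, m2⟩ := ih (if a ∈ lb ∧ a ∉ i then i ++ [a] else i)
      (if a ∈ u then u else u ++ [a]) hi' hu'
    refine ⟨n1, n2, fun x => ?_, fun x => ?_⟩
    · rw [m1 x]
      by_cases hx : x = a <;> by_cases hb : a ∈ lb <;> by_cases hai : a ∈ i <;>
        simp_all
    · rw [m2 x]
      by_cases hx : x = a <;> by_cases hau : a ∈ u <;> simp_all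

-- invariant of A's second loop
theorem pv_loopB :
    ∀ (l : List Int) (u : List Int), u.Nodup →
      ((l.foldl (fun u b => if b ∈ u then u else u ++ [b]) u).Nodup ∧
       (∀ x, x ∈ l.foldl (fun u b => if b ∈ u then u else u ++ [b]) u ↔ x ∈ u ∨ x ∈ l)) := by
  intro l
  induction l with
  | nil => intro u hu; simp [hu]
  | cons b t ih =>
    intro u hu
    simp only [List.foldl_cons]
    have hu' : (if b ∈ u then u else u ++ [b]).Nodup := by
      split_ifs with h
      · exact hu
      · exact hu.append (List.nodup_singleton _) (by simpa using h)
    obtain ⟨n, m⟩ := ih _ hu'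
    refine ⟨n, fun x => ?_⟩
    rw [m x]
    by_cases hx : x = b <;> by_cases hb : b ∈ u <;> simp_all

-- invariant of B's dedup loop over a (≤)-sorted list: the accumulator stays strictly
-- increasing, prev is the last value seen and is already in the accumulator
theorem pv_dedup_loop :
    ∀ (l : List Int) (out : List Int) (prev : Option Int),
      l.Pairwise (· ≤ ·) →
      out.Pairwise (· < ·) →
      (∀ p, prev = some p → p ∈ out) →
      (∀ a ∈ out, ∀ p, prev = some p → a ≤ p) →
      (∀ p, prev = some p → ∀ b ∈ l, p ≤ b) →
      (prev = none → out = []) →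
      ((l.foldl (fun (st : List Int × Option Int) x =>
          let o := if st.2 = none ∨ st.2 ≠ some x then st.1 ++ [x] else st.1
          (o, some x)) (out, prev)).1.Pairwise (· < ·) ∧
       ∀ x, (x ∈ (l.foldl (fun (st : List Int × Option Int) x =>
          let o := if st.2 = none ∨ st.2 ≠ some x then st.1 ++ [x] else st.1
          (o, some x)) (out, prev)).1 ↔ x ∈ out ∨ x ∈ l)) := by
  intro l
  induction l with
  | nil => intro out prev _ ho _ _ _ _; simp [ho]
  | cons x t ih =>
    intro out prev hl ho hmem hle hpb hnone
    simp only [List.foldl_cons]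
    by_cases hskip : prev = some x
    · have hxout : x ∈ out := hmem x hskip
      have hcond : ¬ (prev = none ∨ prev ≠ some x) := by simp [hskip]
      rw [if_neg hcond]
      obtain ⟨p1, p2⟩ := ih out (some x) (List.Pairwise.of_cons hl) ho
        (by intro p hp; cases hp; exact hxout)
        (by intro a ha p hp; cases hp; exact hle a ha x hskip)
        (by intro p hp b hb; cases hp; exact (List.pairwise_cons.mp hl).1 b hb)
        (by intro h; cases h)
      refine ⟨p1, fun z => ?_⟩
      rw [p2 z]
      simp only [List.mem_cons]
      constructor
      · tauto
      · rintro (h | h | h)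
        · exact Or.inl h
        · exact Or.inl (h ▸ hxout)
        · exact Or.inr h
    · have hcond : (prev = none ∨ prev ≠ some x) := by
        cases prev with
        | none => exact Or.inl rfl
        | some p => exact Or.inr hskip
      rw [if_pos hcond]
      have hlt : ∀ a ∈ out, a < x := by
        intro a ha
        cases prev with
        | none => exact absurd ha (by rw [hnone rfl]; simp)
        | some p =>
          have h1 : a ≤ p := hle a ha p rfl
          have h2 : p ≤ x := hpb p rfl x (List.mem_cons_self)
          rcases lt_or_eq_of_le (le_trans h1 h2) with h | h
          · exact h
          · exfalso
            have : p = x := le_antisymm h2 (h ▸ h1)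
            exact hskip (by rw [this])
      have ho' : (out ++ [x]).Pairwise (· < ·) := by
        rw [List.pairwise_append]
        exact ⟨ho, List.pairwise_singleton _ _, by intro a ha b hb; simp at hb; exact hb ▸ hlt a ha⟩
      obtain ⟨p1, p2⟩ := ih (out ++ [x]) (some x) (List.Pairwise.of_cons hl) ho'
        (by intro p hp; cases hp; simp)
        (by intro a ha p hp; cases hp
            rcases List.mem_append.mp ha with h | h
            · exact le_of_lt (hlt a h)
            · simp at h; exact le_of_eq h)
        (by intro p hp b hb; cases hp; exact (List.pairwise_cons.mp hl).1 b hb)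
        (by intro h; cases h)
      refine ⟨p1, fun z => ?_⟩
      rw [p2 z]
      simp [List.mem_append]
      tauto
  
theorem pv_sortedUnique (xs : List Int) :
    (sortedUnique xs).Pairwise (· < ·) ∧ ∀ x, (x ∈ sortedUnique xs ↔ x ∈ xs) := by
  unfold sortedUnique
  obtain ⟨p1, p2⟩ := pv_dedup_loop (PySem.List.sorted xs (fun x => x) false) [] none
    (PySem.List.sorted_pairwise xs (fun x => x)) (List.Pairwise.nil)
    (by intro p hp; cases hp) (by intro a ha; cases ha) (by intro p hp; cases hp)
    (by intro _; rfl)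
  refine ⟨p1, fun x => ?_⟩
  rw [p2 x]
  simp [PySem.List.mem_sorted]

-- the merge over two strictly increasing lists: both outputs are strictly increasing,
-- the first has the common members, the second the union of members
theorem pv_merge :
    ∀ (xs ys : List Int), xs.Pairwise (· < ·) → ys.Pairwise (· < ·) →
      ((pvMerge xs ys).1.Pairwise (· < ·) ∧
       (∀ z, z ∈ (pvMerge xs ys).1 ↔ z ∈ xs ∧ z ∈ ys) ∧
       (pvMerge xs ys).2.Pairwise (· < ·) ∧
       (∀ z, z ∈ (pvMerge xs ys).2 ↔ z ∈ xs ∨ z ∈ ys)) := by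
  intro xs ys
  induction xs, ys using pvMerge.induct with
  | case1 ys => intro _ hy; simp [pvMerge, hy]
  | case2 x xs => intro hx _; simp [pvMerge, hx]
  | case3 xs y ys ih =>
    intro hx hy
    obtain ⟨hyx, hx'⟩ := List.pairwise_cons.mp hx
    obtain ⟨hyy, hy'⟩ := List.pairwise_cons.mp hy
    obtain ⟨pi, mi, pu, mu⟩ := ih hx' hy'
    simp only [pvMerge, if_true]
    refine ⟨?_, ?_, ?_, ?_⟩
    · exact List.pairwise_cons.mpr ⟨fun a ha => hyx a ((mi a).mp ha).1, pi⟩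
    · intro z
      simp only [List.mem_cons, mi z]
      tauto
    · refine List.pairwise_cons.mpr ⟨fun a ha => ?_, pu⟩
      rcases (mu a).mp ha with h | h
      · exact hyx a h
      · exact hyy a h
    · intro z
      simp only [List.mem_cons, mu z]
      tauto
  | case4 x xs y ys hne hlt ih =>
    intro hx hy
    obtain ⟨hxx, hx'⟩ := List.pairwise_cons.mp hx
    obtain ⟨pi, mi, pu, mu⟩ := ih hx' hy
    have hxys : ∀ z ∈ y :: ys, x < z := by
      intro z hz
      rcases List.mem_cons.mp hz with h | h
      · exact h ▸ hlt
      · exact lt_trans hlt ((List.pairwise_cons.mp hy).1 z h)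
    simp only [pvMerge, if_neg hne, if_pos hlt]
    refine ⟨pi, ?_, ?_, ?_⟩
    · intro z
      rw [mi z]
      simp only [List.mem_cons]
      constructor
      · tauto
      · rintro ⟨h1 | h1, h2⟩
        · exact absurd (hxys z (List.mem_cons.mpr h2)) (by rw [h1]; exact lt_irrefl x)
        · exact ⟨h1, h2⟩
    · refine List.pairwise_cons.mpr ⟨fun a ha => ?_, pu⟩
      rcases (mu a).mp ha with h | h
      · exact hxx a h
      · exact hxys a h
    · intro z
      simp only [List.mem_cons, mu z]
      tauto
  | case5 x xs y ys hne hnlt ih =>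
    intro hx hy
    obtain ⟨hyy, hy'⟩ := List.pairwise_cons.mp hy
    obtain ⟨pi, mi, pu, mu⟩ := ih hx hy'
    have hgt : y < x := lt_of_le_of_ne (not_lt.mp hnlt) (fun h => hne h.symm)
    have hyxs : ∀ z ∈ x :: xs, y < z := by
      intro z hz
      rcases List.mem_cons.mp hz with h | h
      · exact h ▸ hgt
      · exact lt_trans hgt ((List.pairwise_cons.mp hx).1 z h)
    simp only [pvMerge, if_neg hne, if_neg hnlt]
    refine ⟨pi, ?_, ?_, ?_⟩
    · intro z
      rw [mi z]
      simp only [List.mem_cons]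
      constructor
      · tauto
      · rintro ⟨h1, h2 | h2⟩
        · exact absurd (hyxs z (List.mem_cons.mpr h1)) (by rw [h2]; exact lt_irrefl y)
        · exact ⟨h1, h2⟩
    · refine List.pairwise_cons.mpr ⟨fun a ha => ?_, pu⟩
      rcases (mu a).mp ha with h | h
      · exact hyxs a h
      · exact hyy a h
    · intro z
      simp only [List.mem_cons, mu z]
      tauto

-- ===== VERDICT (by name: the statement is the Claim_ definition above) =====
theorem intersection_union_spec : Claim_equal_intersection_union := by
  intro list_a list_b _
  unfold Spec_intersection_union intersection_union intersection_union_alt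
  obtain ⟨n1, nu, m1, m2⟩ := pv_loopA list_b list_a [] [] List.nodup_nil List.nodup_nil
  set s1 := list_a.foldl (fun (st : List Int × List Int) a =>
      let union := if a ∈ st.2 then st.2 else st.2 ++ [a]
      let inter := if a ∈ list_b ∧ a ∉ st.1 then st.1 ++ [a] else st.1
      (inter, union)) ([], []) with hs1
  obtain ⟨n2, m2'⟩ := pv_loopB list_b s1.2 nu
  obtain ⟨pa, ma⟩ := pv_sortedUnique list_a
  obtain ⟨pb, mb⟩ := pv_sortedUnique list_b
  obtain ⟨pi, mi, pu, mu⟩ := pv_merge (sortedUnique list_a) (sortedUnique list_b) pa pb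
  refine Prod.ext ?_ ?_
  · apply PySem.List.sorted_eq_of_perm_of_pairwise_lt
    · rw [List.perm_ext_iff_of_nodup (pi.imp ne_of_lt) n1]
      intro z
      rw [mi z, m1 z, ma z, mb z]
      simp
    · exact pi
  · apply PySem.List.sorted_eq_of_perm_of_pairwise_lt
    · rw [List.perm_ext_iff_of_nodup (pu.imp ne_of_lt) n2]
      intro z
      rw [mu z, m2' z, m2 z, ma z, mb z]
      simp
    · exact pu
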